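-- pv_equiv track=rewrite | github.com/trilinos/Trilinos | packages/rol/rol_parameters/find_instances.py | build_list_hierarchy
-- ===== SOURCE A (Python) =====
-- def build_list_hierarchy(data_dict, input_lists):
--     def resolve_list(value_list):
--         if not value_list:
--             return value_list
--
--         first_item = value_list[0]
--         if first_item in data_dict and not first_item.startswith('"'):
--             return resolve_list(data_dict[first_item]) + value_list[1:]
--         else:
--             return [first_item] + resolve_list(value_list[1:])
--
--     return [resolve_list(sublist) for sublist in input_lists]
-- ===== SOURCE B (Python) =====
-- def build_list_hierarchy(data_dict, input_lists):
--     def split_first_key(lst):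
--         prefix = []
--         for idx, item in enumerate(lst):
--             if item in data_dict and not item.startswith('"'):
--                 return prefix, item, lst[idx + 1:]
--             prefix.append(item)
--         return prefix, None, None
--
--     result = []
--     for sublist in input_lists:
--         out = []
--         tails = []
--         cur = sublist
--         while True:
--             prefix, key, tail = split_first_key(cur)
--             out.extend(prefix)
--             if key is None:
--                 break
--             tails.append(tail)
--             cur = data_dict[key]
--         for t in reversed(tails):
--             out.extend(t)
--         result.append(out)
--     return result
-- ===== Notes on version B (the rewrite author's own statement) =====
-- stated objective: alternative
-- what changed: Replaces A's nested recursion (which rebuilds lists with repeated [x]+rest concatenations and re-enters itself for every element) by one iterative chain-following loop per sublist that splits at the first dict key, accumulates output with extend, and stacks pending tails to append at the end.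
import Mathlib
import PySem

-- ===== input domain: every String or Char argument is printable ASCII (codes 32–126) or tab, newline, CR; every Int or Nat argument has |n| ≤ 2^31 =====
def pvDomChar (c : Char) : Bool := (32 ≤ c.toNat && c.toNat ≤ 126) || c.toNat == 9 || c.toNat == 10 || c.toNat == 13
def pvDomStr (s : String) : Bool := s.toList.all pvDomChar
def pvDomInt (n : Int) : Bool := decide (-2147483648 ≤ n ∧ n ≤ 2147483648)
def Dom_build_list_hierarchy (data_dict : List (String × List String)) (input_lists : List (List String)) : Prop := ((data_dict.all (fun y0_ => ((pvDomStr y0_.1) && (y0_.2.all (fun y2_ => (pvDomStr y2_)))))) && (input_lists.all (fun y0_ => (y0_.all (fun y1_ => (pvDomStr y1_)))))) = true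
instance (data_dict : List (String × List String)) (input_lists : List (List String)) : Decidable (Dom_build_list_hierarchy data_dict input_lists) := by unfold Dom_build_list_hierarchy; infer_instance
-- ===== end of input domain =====

-- B replaces A's nested recursion (with its repeated list concatenations) by a single
-- iterative chain-following loop per sublist with an explicit stack of pending tails.
-- Equivalence is about the return value; neither version mutates its arguments.

-- shared helper: `x in data_dict and not x.startswith('"')`
def pvIsKey (data_dict : List (String × List String)) (x : String) : Bool :=
  ((PySem.Dict.mk data_dict).get? x).isSome && !(PySem.Str.startswith x "\"")

-- ===== PORT A =====
-- Python A's inner `resolve_list` is general recursion (it recurses into dict values),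
-- so it is ported with an Option-valued fuel counter: `none` = fuel exhausted, which
-- Pre_ (acyclic reference chains) rules out at the fuel used below.
def pvResolveA (data_dict : List (String × List String)) : Nat → List String → Option (List String)
  | 0, _ => none
  | _ + 1, [] => some []                               -- `if not value_list: return value_list`
  | f + 1, first_item :: rest =>
    if pvIsKey data_dict first_item then
      (pvResolveA data_dict f ((PySem.Dict.mk data_dict).getD first_item [])).map (· ++ rest)
    else
      (pvResolveA data_dict f rest).map (first_item :: ·)

-- fuel that provably suffices under Pre_: |sublist| + 1 + |dict| * (sum of value lengths + 1)
def pvSumVals (data_dict : List (String × List String)) : Nat :=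
  (data_dict.map (fun p => p.2.length)).sum

def pvFuelA (data_dict : List (String × List String)) (l : List String) : Nat :=
  l.length + 1 + data_dict.length * (pvSumVals data_dict + 1)

def build_list_hierarchy (data_dict : List (String × List String)) (input_lists : List (List String)) : List (List String) :=
  input_lists.map (fun sublist => (pvResolveA data_dict (pvFuelA data_dict sublist) sublist).getD [])

-- ===== PORT B =====
-- B's `split_first_key`: scan for the first unquoted dict key, returning (pre, key, tail)
def pvSplitFirstKey (data_dict : List (String × List String)) : List String → List String × Option (String × List String)
  | [] => ([], none)
  | x :: xs =>
    if pvIsKey data_dict x then ([], some (x, xs))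
    else
      let r := pvSplitFirstKey data_dict xs
      (x :: r.1, r.2)

-- B's while-loop; `tails` holds the pending tails newest-first (Python appends and then
-- iterates `reversed(tails)`, which is the same order). Fuel |dict| + 1 bounds the loop
-- iterations under Pre_ (each iteration but the last follows a distinct key).
def pvResolveB (data_dict : List (String × List String)) : Nat → List String → List String → List (List String) → List String
  | 0, _, out, tails => out ++ tails.flatten
  | f + 1, cur, out, tails =>
    match pvSplitFirstKey data_dict cur with
    | (pre, none) => (out ++ pre) ++ tails.flatten
    | (pre, some (key, tail)) =>
        pvResolveB data_dict f ((PySem.Dict.mk data_dict).getD key []) (out ++ pre) (tail :: tails)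

def build_list_hierarchy_alt (data_dict : List (String × List String)) (input_lists : List (List String)) : List (List String) :=
  input_lists.map (fun sublist => pvResolveB data_dict (data_dict.length + 1) sublist [] [])

-- ===== PRECONDITION & SPEC =====
-- the first unquoted dict key occurring in a list (a membership scan, not either port)
def pvHeadKey (data_dict : List (String × List String)) (l : List String) : Option String :=
  l.find? (pvIsKey data_dict)

-- one step of the key-reference relation: from key k to the first unquoted key of its value
def pvStep (data_dict : List (String × List String)) (k : String) : Option String :=
  if pvIsKey data_dict k then pvHeadKey data_dict ((PySem.Dict.mk data_dict).getD k [])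
  else none

def pvIter (data_dict : List (String × List String)) : Nat → Option String → Option String
  | 0, o => o
  | n + 1, o => pvIter data_dict n (o.bind (pvStep data_dict))

-- Pre_ = acyclicity of the key-reference relation along each sublist's chain, stated as
-- bounded iteration of pvStep (a property of the dict's reference graph, checkable without
-- running either port). It excludes exactly the inputs on which some sublist's chain of
-- references never ends, i.e. cycles: there Python A recurses forever (RecursionError).
def Pre_build_list_hierarchy (data_dict : List (String × List String)) (input_lists : List (List String)) : Prop :=
  ∀ sublist ∈ input_lists, pvIter data_dict data_dict.length (pvHeadKey data_dict sublist) = none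
instance (data_dict : List (String × List String)) (input_lists : List (List String)) : Decidable (Pre_build_list_hierarchy data_dict input_lists) := by unfold Pre_build_list_hierarchy; infer_instance

def pvWitness_build_list_hierarchy : (List (String × List String)) × List (List String) :=
  ([("a", ["b", "c"]), ("b", ["\"q", "c"])], [["x", "a", "y"], ["b"], []])

def Spec_build_list_hierarchy (data_dict : List (String × List String)) (input_lists : List (List String)) (out : List (List String)) : Prop := out = build_list_hierarchy_alt data_dict input_lists
instance (data_dict : List (String × List String)) (input_lists : List (List String)) (out : List (List String)) : Decidable (Spec_build_list_hierarchy data_dict input_lists out) := by unfold Spec_build_list_hierarchy; infer_instance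

-- ===== CLAIM (what is proved, stated in full; the proofs are below) =====
def Claim_equal_build_list_hierarchy : Prop := ∀ (data_dict : List (String × List String)) (input_lists : List (List String)), Dom_build_list_hierarchy data_dict input_lists → Pre_build_list_hierarchy data_dict input_lists → Spec_build_list_hierarchy data_dict input_lists (build_list_hierarchy data_dict input_lists)

-- ===== LEMMAS AND PROOFS =====

-- pvHeadKey (a find?) returns exactly the key pvSplitFirstKey splits at
theorem pvHeadKey_eq (dd : List (String × List String)) (l : List String) :
    pvHeadKey dd l = ((pvSplitFirstKey dd l).2).map Prod.fst := by
  induction l with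
  | nil => simp [pvHeadKey, pvSplitFirstKey]
  | cons x xs ih =>
    by_cases hk : pvIsKey dd x = true
    · simp [pvHeadKey, pvSplitFirstKey, hk]
    · simp only [pvHeadKey, pvSplitFirstKey, List.find?_cons] at ih ⊢
      simp [hk, ih]

-- common specification both ports are reduced to: follow the chain n times
def pvSpecResolve (data_dict : List (String × List String)) : Nat → List String → List String
  | 0, l => l
  | n + 1, l =>
    match pvSplitFirstKey data_dict l with
    | (_, none) => l
    | (pre, some (key, tail)) =>
        pre ++ pvSpecResolve data_dict n ((PySem.Dict.mk data_dict).getD key []) ++ tail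

-- splitFirstKey decomposition facts
theorem pvSplit_none (dd : List (String × List String)) (l : List String)
    (h : (pvSplitFirstKey dd l).2 = none) : (pvSplitFirstKey dd l).1 = l := by
  induction l with
  | nil => rfl
  | cons x xs ih =>
    by_cases hk : pvIsKey dd x = true
    · simp [pvSplitFirstKey, hk] at h
    · simp [pvSplitFirstKey, hk] at h ⊢; exact ih h

theorem pvSplit_len (dd : List (String × List String)) (l : List String) (k : String) (t : List String)
    (h : (pvSplitFirstKey dd l).2 = some (k, t)) :
    (pvSplitFirstKey dd l).1.length + 1 + t.length = l.length ∧ pvIsKey dd k = true := by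
  induction l with
  | nil => simp [pvSplitFirstKey] at h
  | cons x xs ih =>
    by_cases hk : pvIsKey dd x = true
    · simp [pvSplitFirstKey, hk] at h ⊢
      obtain ⟨hx, ht⟩ := h; subst hx; subst ht; exact ⟨by omega, hk⟩
    · simp [pvSplitFirstKey, hk] at h ⊢
      obtain ⟨h1, h2⟩ := ih h
      exact ⟨by omega, h2⟩

-- the value looked up is one of the dict's values, so its length is ≤ pvSumVals
theorem pvGetD_len_le (dd : List (String × List String)) (k : String) :
    ((PySem.Dict.mk dd).getD k []).length ≤ pvSumVals dd := by
  induction dd with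
  | nil => simp [PySem.Dict.getD, PySem.Dict.get?, pvSumVals]
  | cons p rest ih =>
    obtain ⟨pk, pv⟩ := p
    have : (PySem.Dict.mk ((pk, pv) :: rest)).getD k [] =
        if pk == k then pv else (PySem.Dict.mk rest).getD k [] := by
      rw [PySem.Dict.getD_eq_get?_getD, PySem.Dict.get?_mk_cons]
      split_ifs <;> simp [PySem.Dict.getD_eq_get?_getD]
    rw [this]
    have hs : pvSumVals ((pk, pv) :: rest) = pv.length + pvSumVals rest := by
      simp [pvSumVals]
    split_ifs
    · omega
    · omega

-- A's recursion, split at the first key (one full chain step)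
theorem pvResolveA_split (dd : List (String × List String)) :
    ∀ (l : List String) (f : Nat), l.length + 1 ≤ f →
    pvResolveA dd f l =
      match (pvSplitFirstKey dd l) with
      | (_, none) => some l
      | (pre, some (key, tail)) =>
          (pvResolveA dd (f - (pre.length + 1)) ((PySem.Dict.mk dd).getD key [])).map
            (fun r => pre ++ r ++ tail) := by
  intro l
  induction l with
  | nil =>
    intro f hf
    obtain ⟨f', rfl⟩ : ∃ f', f = f' + 1 := ⟨f - 1, by omega⟩
    simp [pvResolveA, pvSplitFirstKey]
  | cons x xs ih =>
    intro f hf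
    obtain ⟨f', rfl⟩ : ∃ f', f = f' + 1 := ⟨f - 1, by omega⟩
    by_cases hk : pvIsKey dd x = true
    · simp only [pvResolveA, hk, if_pos, pvSplitFirstKey]
      simp
    · simp only [pvResolveA, hk, if_neg, Bool.not_eq_true, pvSplitFirstKey]
      rw [ih f' (by simp at hf ⊢; omega)]
      cases hsp : pvSplitFirstKey dd xs with
      | mk pre r =>
        cases r with
        | none => simp
        | some kt =>
          cases kt with
          | mk key tail =>
            dsimp only
            have harith : f' - (pre.length + 1) = f' + 1 - ((x :: pre).length + 1) := by
              simp only [List.length_cons]; omega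
            rw [harith]
            generalize pvResolveA dd (f' + 1 - ((x :: pre).length + 1)) ((PySem.Dict.mk dd).getD key []) = o
            cases o with
            | none => rfl
            | some v => simp

-- A computes the chain specification, given fuel l.length + 1 + n * (pvSumVals + 1)
theorem pvResolveA_spec (dd : List (String × List String)) :
    ∀ (n : Nat) (l : List String) (f : Nat),
    pvIter dd n (pvHeadKey dd l) = none →
    l.length + 1 + n * (pvSumVals dd + 1) ≤ f →
    pvResolveA dd f l = some (pvSpecResolve dd n l) := by
  intro n
  induction n with
  | zero =>
    intro l f hch hf
    simp only [pvIter] at hch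
    have h2 : (pvSplitFirstKey dd l).2 = none := by
      rw [pvHeadKey_eq] at hch
      cases h : (pvSplitFirstKey dd l).2 with
      | none => rfl
      | some kt => rw [h] at hch; simp at hch
    rw [pvResolveA_split dd l f (by omega)]
    cases hsp : pvSplitFirstKey dd l with
    | mk pre r =>
      rw [hsp] at h2; cases r with
      | none => simp [pvSpecResolve]
      | some kt => simp at h2
  | succ n ih =>
    intro l f hch hf
    rw [pvResolveA_split dd l f (by omega)]
    cases hsp : pvSplitFirstKey dd l with
    | mk pre r =>
      cases r with
      | none => simp [pvSpecResolve, hsp]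
      | some kt =>
        cases kt with
        | mk key tail =>
          obtain ⟨hlen, hkey⟩ := pvSplit_len dd l key tail (by rw [hsp])
          rw [hsp] at hlen
          simp only at hlen
          -- chain hypothesis steps to the value of `key`
          have hch' : pvIter dd n (pvHeadKey dd ((PySem.Dict.mk dd).getD key [])) = none := by
            have : pvHeadKey dd l = some key := by
              rw [pvHeadKey_eq, hsp]; rfl
            rw [this] at hch
            simpa [pvIter, pvStep, hkey] using hch
          have hv := pvGetD_len_le dd key
          dsimp only
          rw [ih ((PySem.Dict.mk dd).getD key []) (f - (pre.length + 1)) hch'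
              (by have hm : (n + 1) * (pvSumVals dd + 1) = n * (pvSumVals dd + 1) + (pvSumVals dd + 1) := by ring
                  omega)]
          simp only [Option.map_some]
          conv_rhs => rw [pvSpecResolve]
          rw [hsp]

-- B computes the chain specification
theorem pvResolveB_spec (dd : List (String × List String)) :
    ∀ (n : Nat) (cur out : List String) (tails : List (List String)),
    pvIter dd n (pvHeadKey dd cur) = none →
    pvResolveB dd (n + 1) cur out tails = out ++ pvSpecResolve dd n cur ++ tails.flatten := by
  intro n
  induction n with
  | zero =>
    intro cur out tails hch
    simp only [pvIter] at hch
    have h2 : (pvSplitFirstKey dd cur).2 = none := by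
      rw [pvHeadKey_eq] at hch
      cases h : (pvSplitFirstKey dd cur).2 with
      | none => rfl
      | some kt => rw [h] at hch; simp at hch
    have h1 := pvSplit_none dd cur h2
    unfold pvResolveB
    cases hsp : pvSplitFirstKey dd cur with
    | mk pre r =>
      rw [hsp] at h1 h2
      cases r with
      | none => simp at h1; subst h1; simp [pvSpecResolve]
      | some kt => simp at h2
  | succ n ih =>
    intro cur out tails hch
    unfold pvResolveB
    cases hsp : pvSplitFirstKey dd cur with
    | mk pre r =>
      cases r with
      | none =>
        have h1 := pvSplit_none dd cur (by rw [hsp])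
        rw [hsp] at h1; simp at h1; subst h1
        conv_rhs => rw [pvSpecResolve]
        rw [hsp]
      | some kt =>
        cases kt with
        | mk key tail =>
          obtain ⟨_, hkey⟩ := pvSplit_len dd cur key tail (by rw [hsp])
          have hch' : pvIter dd n (pvHeadKey dd ((PySem.Dict.mk dd).getD key [])) = none := by
            have : pvHeadKey dd cur = some key := by rw [pvHeadKey_eq, hsp]; rfl
            rw [this] at hch
            simpa [pvIter, pvStep, hkey] using hch
          dsimp only
          rw [ih ((PySem.Dict.mk dd).getD key []) (out ++ pre) (tail :: tails) hch']
          conv_rhs => rw [pvSpecResolve]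
          rw [hsp]
          simp

-- ===== VERDICT (by name: the statement is the Claim_ definition above) =====
theorem build_list_hierarchy_spec : Claim_equal_build_list_hierarchy := by
  intro dd ll _ hpre
  unfold Spec_build_list_hierarchy build_list_hierarchy build_list_hierarchy_alt
  apply List.map_congr_left
  intro sub hsub
  have hch := hpre sub hsub
  rw [pvResolveA_spec dd dd.length sub (pvFuelA dd sub) hch (by unfold pvFuelA; omega)]
  rw [pvResolveB_spec dd dd.length sub [] [] hch]
  simp
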